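-- pv_equiv track=rewrite | github.com/cybertronai/ByteDMD-definition | docs/generate_illustration.py | upper_half_spiral
-- ===== SOURCE A (Python) =====
-- import math
--
-- def isqrt_ceil(x):
--     if x <= 0: return 0
--     return math.isqrt(x - 1) + 1
--
-- def upper_half_spiral(n):
--     for i in range(1, n + 1):
--         k = isqrt_ceil(i)
--         start_i = (k - 1)**2 + 1
--         idx = i - start_i
--         if k % 2 == 1:
--             x = (k - 1) - idx
--         else:
--             x = -(k - 1) + idx
--         y = k - abs(x)
--         yield x, y
-- ===== SOURCE B (Python) =====
-- def upper_half_spiral(n):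
--     count = 0
--     k = 1
--     while count < n:
--         xs = range(k - 1, -k, -1) if k % 2 == 1 else range(-(k - 1), k)
--         for x in xs:
--             yield x, k - abs(x)
--             count += 1
--             if count == n:
--                 return
--         k += 1
-- ===== Notes on version B (the rewrite author's own statement) =====
-- stated objective: faster
-- what changed: B walks the spiral shell by shell with a nested loop over each shell's 2k-1 x-values, truncating at n, instead of recomputing the shell number of every index i via an integer square root.
import Mathlib
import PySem

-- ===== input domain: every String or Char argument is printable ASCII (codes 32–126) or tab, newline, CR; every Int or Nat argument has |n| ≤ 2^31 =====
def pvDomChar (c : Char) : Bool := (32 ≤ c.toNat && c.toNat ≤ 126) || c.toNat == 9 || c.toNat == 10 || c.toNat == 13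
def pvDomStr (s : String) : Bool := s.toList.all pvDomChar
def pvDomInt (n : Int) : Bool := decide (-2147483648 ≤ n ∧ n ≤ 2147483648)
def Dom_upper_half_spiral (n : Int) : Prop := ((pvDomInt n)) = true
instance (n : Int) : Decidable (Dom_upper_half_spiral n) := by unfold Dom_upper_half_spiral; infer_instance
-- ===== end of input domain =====

-- B iterates spiral shells k = 1,2,… with a nested inner loop over the 2k-1 x-values
-- of each shell instead of recovering k from the point index via an integer square root;
-- objective: alternative decomposition. (A is a generator; both are compared as the full list of yields.)

-- ===== PORT A =====
def isqrt_ceil (x : Int) : Int :=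
  if x ≤ 0 then 0 else (Nat.sqrt (x - 1).toNat : Int) + 1    -- math.isqrt on a nonnegative int

-- body of A's loop for index i (yield of iteration i)
def pointAt (i : Int) : Int × Int :=
  let k := isqrt_ceil i
  let start_i := (k - 1) ^ 2 + 1
  let idx := i - start_i
  let x := if k % 2 = 1 then (k - 1) - idx else -(k - 1) + idx
  (x, k - |x|)

def upper_half_spiral (n : Int) : List (Int × Int) :=
  (PySem.List.pyRange 1 (n + 1) 1).map pointAt

-- ===== PORT B =====
-- the x-values of shell k, in emission order
def shellXs (k : Int) : List Int :=
  if k % 2 = 1 then PySem.List.pyRange (k - 1) (-k) (-1)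
  else PySem.List.pyRange (-(k - 1)) k 1

-- while-loop of B: r = n - count points still to emit, current shell k.
-- The 'sh.length ≠ 0' conjunct is a totality guard only (every reached shell has k ≥ 1, hence 2k-1 ≥ 1 points).
def spiralLoop (k : Int) (r : Nat) : List (Int × Int) :=
  if r = 0 then [] else
    let sh := (shellXs k).map (fun x => (x, k - |x|))
    if h : sh.length < r ∧ sh.length ≠ 0 then
      sh ++ spiralLoop (k + 1) (r - sh.length)
    else sh.take r
  termination_by r
  decreasing_by exact Nat.sub_lt (Nat.pos_of_ne_zero (by assumption)) (Nat.pos_of_ne_zero h.2)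

def upper_half_spiral_alt (n : Int) : List (Int × Int) := spiralLoop 1 n.toNat

-- ===== PRECONDITION & SPEC =====
def Spec_upper_half_spiral (n : Int) (out : List (Int × Int)) : Prop := out = upper_half_spiral_alt n
instance (n : Int) (out : List (Int × Int)) : Decidable (Spec_upper_half_spiral n out) := by unfold Spec_upper_half_spiral; infer_instance

-- ===== CLAIM (what is proved, stated in full; the proofs are below) =====
def Claim_equal_upper_half_spiral : Prop := ∀ (n : Int), Dom_upper_half_spiral n → Spec_upper_half_spiral n (upper_half_spiral n)

-- ===== LEMMAS AND PROOFS =====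

theorem isqrt_ceil_shell (k i : Int) (hk : 1 ≤ k) (h1 : (k - 1) ^ 2 < i) (h2 : i ≤ k ^ 2) :
    isqrt_ceil i = k := by
  have hsq : (0:Int) ≤ (k - 1) ^ 2 := sq_nonneg _
  have hi : 1 ≤ i := by omega
  have hc : ((k - 1).toNat : Int) = k - 1 := Int.toNat_of_nonneg (by omega)
  have hc2 : ((i - 1).toNat : Int) = i - 1 := Int.toNat_of_nonneg (by omega)
  have hl : (k - 1).toNat * (k - 1).toNat ≤ (i - 1).toNat := by
    have : ((k - 1).toNat * (k - 1).toNat : Int) ≤ ((i - 1).toNat : Int) := by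
      push_cast [hc, hc2]; nlinarith
    exact_mod_cast this
  have hu : (i - 1).toNat < ((k - 1).toNat + 1) * ((k - 1).toNat + 1) := by
    have : ((i - 1).toNat : Int) < (((k - 1).toNat + 1) * ((k - 1).toNat + 1) : Int) := by
      push_cast [hc, hc2]; nlinarith
    exact_mod_cast this
  have e1 : (k - 1).toNat ≤ Nat.sqrt (i - 1).toNat := Nat.le_sqrt'.mpr (by rw [pow_two]; exact hl)
  have e2 : Nat.sqrt (i - 1).toNat < (k - 1).toNat + 1 := Nat.sqrt_lt'.mpr (by rw [pow_two]; exact hu)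
  unfold isqrt_ceil
  rw [if_neg (by omega)]
  omega
theorem pointAt_shell (k : Int) (j : Nat) (hk : 1 ≤ k) (hj : (j : Int) ≤ 2 * k - 2) :
    pointAt ((k - 1) ^ 2 + 1 + j) =
      (if k % 2 = 1 then (k - 1) - j else -(k - 1) + j,
       k - |if k % 2 = 1 then (k - 1) - j else -(k - 1) + j|) := by
  have hj0 : (0:Int) ≤ (j : Int) := Int.natCast_nonneg j
  have e : isqrt_ceil ((k - 1) ^ 2 + 1 + j) = k :=
    isqrt_ceil_shell k _ hk (by omega) (by nlinarith)
  unfold pointAt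
  simp only [e]
  have : (k - 1) ^ 2 + 1 + (j:Int) - ((k - 1) ^ 2 + 1) = j := by ring
  rw [this]
theorem shell_eq_map (k : Int) (hk : 1 ≤ k) :
    (shellXs k).map (fun x => (x, k - |x|)) =
      (PySem.List.pyRange ((k - 1) ^ 2 + 1) ((k - 1) ^ 2 + 1 + (2 * k - 1)) 1).map pointAt := by
  have hR : PySem.List.pyRange ((k - 1) ^ 2 + 1) ((k - 1) ^ 2 + 1 + (2 * k - 1)) 1
      = (List.range (2 * k - 1).toNat).map (fun (j : Nat) => (k - 1) ^ 2 + 1 + (j : Int)) := by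
    rw [PySem.List.pyRange_one,
      show (k - 1) ^ 2 + 1 + (2 * k - 1) - ((k - 1) ^ 2 + 1) = 2 * k - 1 from by ring]
  rw [hR, List.map_map]
  unfold shellXs
  by_cases hp : k % 2 = 1
  · rw [if_pos hp, PySem.List.pyRange_neg_one]
    have : (k - 1 - (-k)).toNat = (2 * k - 1).toNat := by omega
    rw [this, List.map_map]
    refine List.map_congr_left (fun j hj => ?_)
    have hjlt : (j : Int) ≤ 2 * k - 2 := by
      have := List.mem_range.mp hj; omega
    simp only [Function.comp]
    rw [pointAt_shell k j hk hjlt, if_pos hp]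
  · rw [if_neg hp, PySem.List.pyRange_one]
    have : (k - -(k - 1)).toNat = (2 * k - 1).toNat := by omega
    rw [this, List.map_map]
    refine List.map_congr_left (fun j hj => ?_)
    have hjlt : (j : Int) ≤ 2 * k - 2 := by
      have := List.mem_range.mp hj; omega
    simp only [Function.comp]
    rw [pointAt_shell k j hk hjlt, if_neg hp]
theorem length_shellXs (k : Int) : (shellXs k).length = (2 * k - 1).toNat := by
  unfold shellXs
  by_cases hp : k % 2 = 1
  · rw [if_pos hp, PySem.List.length_pyRange_neg_one]; omega
  · rw [if_neg hp, PySem.List.length_pyRange_one]; omega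
theorem spiralLoop_eq (r : Nat) (k : Int) (hk : 1 ≤ k) :
    spiralLoop k r =
      (PySem.List.pyRange ((k - 1) ^ 2 + 1) ((k - 1) ^ 2 + 1 + r) 1).map pointAt := by
  induction r using Nat.strong_induction_on generalizing k with
  | _ r ih =>
    rw [spiralLoop]
    by_cases hr : r = 0
    · subst hr
      rw [if_pos rfl, PySem.List.pyRange_one_eq_nil (by omega)]
      simp
    · rw [if_neg hr]
      have hlen : ((shellXs k).map (fun x => (x, k - |x|))).length = (2 * k - 1).toNat := by
        rw [List.length_map, length_shellXs]
      have hL1 : 1 ≤ (2 * k - 1).toNat := by omega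
      have hsplit : (k - 1) ^ 2 + 1 + (2 * k - 1) = k ^ 2 + 1 := by ring
      by_cases hc : ((shellXs k).map (fun x => (x, k - |x|))).length < r ∧
          ((shellXs k).map (fun x => (x, k - |x|))).length ≠ 0
      · rw [dif_pos hc]
        obtain ⟨hlt, -⟩ := hc
        rw [hlen] at hlt
        have hrec := ih (r - (2 * k - 1).toNat) (by omega) (k + 1) (by omega)
        rw [hlen, hrec]
        have e1 : (k + 1 - 1) ^ 2 + 1 = k ^ 2 + 1 := by ring
        have e2 : (k ^ 2 + 1 : Int) + ((r - (2 * k - 1).toNat : Nat) : Int)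
            = (k - 1) ^ 2 + 1 + r := by
          push_cast [Nat.cast_sub (le_of_lt hlt)]
          have : ((2 * k - 1).toNat : Int) = 2 * k - 1 := by omega
          rw [this]; ring
        rw [e1, e2, shell_eq_map k hk]
        rw [PySem.List.pyRange_one_append ((k - 1) ^ 2 + 1) ((k - 1) ^ 2 + 1 + (2 * k - 1))
            ((k - 1) ^ 2 + 1 + r) (by omega) (by omega)]
        · rw [List.map_append, hsplit]
      · rw [dif_neg hc]
        rw [hlen] at hc
        have hle : r ≤ (2 * k - 1).toNat := by omega
        rw [shell_eq_map k hk]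
        rw [PySem.List.pyRange_one_append ((k - 1) ^ 2 + 1) ((k - 1) ^ 2 + 1 + r)
            ((k - 1) ^ 2 + 1 + (2 * k - 1)) (by omega) (by omega)]
        rw [List.map_append, List.take_append_of_le_length, List.take_of_length_le]
        · rw [List.length_map, PySem.List.length_pyRange_one]; omega
        · rw [List.length_map, PySem.List.length_pyRange_one]; omega

-- ===== VERDICT (by name: the statement is the Claim_ definition above) =====
theorem upper_half_spiral_spec : Claim_equal_upper_half_spiral := by
  intro n _
  unfold Spec_upper_half_spiral upper_half_spiral upper_half_spiral_alt
  rw [spiralLoop_eq n.toNat 1 le_rfl]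
  by_cases h : 0 ≤ n
  · have h1 : (1:Int) - 1 = 0 := rfl
    have : ((1:Int) - 1) ^ 2 + 1 + (n.toNat : Int) = n + 1 := by rw [h1]; push_cast [Int.toNat_of_nonneg h]; ring
    rw [this]; norm_num
  · rw [PySem.List.pyRange_one_eq_nil (by omega), PySem.List.pyRange_one_eq_nil (by norm_num; omega)]
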